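-- pv_equiv track=rewrite | github.com/chendav/pitfall_detector | pitfall_detector/analyzer.py | _extract_readme_excerpt
-- ===== SOURCE A (Python) =====
-- def _extract_readme_excerpt(readme: str, max_chars: int = 1000) -> str:
--     """Extract relevant excerpt from README for analysis."""
--     if not readme:
--         return "No documentation available"
--
--     # Look for installation, configuration, or usage sections
--     important_sections = []
--     lines = readme.split('\n')
--
--     capture_next = 0
--     for line in lines:
--         # Check for important section headers
--         if any(keyword in line.lower() for keyword in
--                ['install', 'setup', 'config', 'usage', 'quick', 'start', 'port', 'environment']):
--             capture_next = 10  # Capture next 10 lines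
--             important_sections.append(line)
--         elif capture_next > 0:
--             important_sections.append(line)
--             capture_next -= 1
--
--     # If no specific sections found, take the first part
--     if not important_sections:
--         important_sections = lines[:20]  # First 20 lines
--
--     excerpt = '\n'.join(important_sections)
--
--     # Truncate if too long
--     if len(excerpt) > max_chars:
--         excerpt = excerpt[:max_chars] + "..."
--
--     return excerpt
-- ===== SOURCE B (Python) =====
-- def _extract_readme_excerpt(readme: str, max_chars: int = 1000) -> str:
--     """Extract relevant excerpt from README for analysis."""
--     if not readme:
--         return "No documentation available"
--
--     lines = readme.split('\n')
--     keywords = ['install', 'setup', 'config', 'usage', 'quick', 'start', 'port', 'environment']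
--
--     def is_header(line):
--         return any(kw in line.lower() for kw in keywords)
--
--     # A line is kept iff some header line lies within the previous 10 lines (or it is one itself):
--     # stateless sliding-window membership test instead of a countdown accumulator.
--     important_sections = [line for j, line in enumerate(lines)
--                           if any(is_header(l) for l in lines[max(0, j - 10):j + 1])]
--
--     if not important_sections:
--         important_sections = lines[:20]
--
--     excerpt = '\n'.join(important_sections)
--
--     if len(excerpt) > max_chars:
--         excerpt = excerpt[:max_chars] + "..."
--
--     return excerpt
-- ===== Notes on version B (the rewrite author's own statement) =====
-- stated objective: alternative
-- what changed: Replaces A's stateful countdown accumulator (capture_next) with a stateless comprehension that keeps a line iff a keyword header occurs in the sliding window lines[max(0,j-10):j+1]; fallback, join and truncation are unchanged.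
import Mathlib
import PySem

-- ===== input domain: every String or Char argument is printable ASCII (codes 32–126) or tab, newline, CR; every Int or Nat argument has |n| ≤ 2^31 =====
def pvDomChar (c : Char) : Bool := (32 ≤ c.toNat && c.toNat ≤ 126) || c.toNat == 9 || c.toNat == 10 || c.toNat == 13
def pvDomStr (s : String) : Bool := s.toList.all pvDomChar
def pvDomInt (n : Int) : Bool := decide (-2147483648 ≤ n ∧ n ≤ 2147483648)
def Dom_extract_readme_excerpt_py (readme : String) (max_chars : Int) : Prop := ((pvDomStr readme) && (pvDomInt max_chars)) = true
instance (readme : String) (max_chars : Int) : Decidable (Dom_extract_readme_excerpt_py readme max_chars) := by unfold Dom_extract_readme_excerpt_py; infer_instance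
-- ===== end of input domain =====

-- B replaces A's countdown accumulator by a stateless sliding-window test per line (alternative decomposition, same result).

-- ===== PORT A =====
-- the keyword list literal from the Python source (shared by both ports, as in the source)
def pvKeywords : List String :=
  ["install", "setup", "config", "usage", "quick", "start", "port", "environment"]

def extract_readme_excerpt_py (readme : String) (max_chars : Int) : String :=
  if readme = "" then "No documentation available" else
  let lines := (PySem.Str.split? readme "\n").getD []  -- sep "\n" is non-empty, so split? is always some
  -- for line in lines: stateful loop over (important_sections, capture_next)
  let st := lines.foldl (fun (st : List String × Int) line =>
      if pvKeywords.any (fun kw => PySem.Str.isIn kw (PySem.Str.lower line)) then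
        (st.1 ++ [line], 10)
      else if st.2 > 0 then
        (st.1 ++ [line], st.2 - 1)
      else st) ([], 0)
  let important_sections := if st.1 = [] then PySem.List.slice lines none (some 20) else st.1
  let excerpt := PySem.Str.join "\n" important_sections
  if PySem.Str.len excerpt > max_chars then
    PySem.Str.slice excerpt none (some max_chars) ++ "..."
  else excerpt

-- ===== PORT B =====
-- def is_header(line): any(kw in line.lower() for kw in keywords)
def pvIsHeader (line : String) : Bool :=
  pvKeywords.any (fun kw => PySem.Str.isIn kw (PySem.Str.lower line))

def extract_readme_excerpt_py_alt (readme : String) (max_chars : Int) : String :=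
  if readme = "" then "No documentation available" else
  let lines := (PySem.Str.split? readme "\n").getD []  -- sep "\n" is non-empty, so split? is always some
  -- comprehension: keep line j iff some header occurs in lines[max(0, j-10) : j+1]
  let important_sections :=
    ((PySem.List.enumerate lines).filter (fun p =>
        (PySem.List.slice lines (some (max 0 (p.1 - 10))) (some (p.1 + 1))).any pvIsHeader)).map (·.2)
  let important_sections := if important_sections = [] then PySem.List.slice lines none (some 20) else important_sections
  let excerpt := PySem.Str.join "\n" important_sections
  if PySem.Str.len excerpt > max_chars then
    PySem.Str.slice excerpt none (some max_chars) ++ "..."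
  else excerpt

-- ===== PRECONDITION & SPEC =====
def Spec_extract_readme_excerpt_py (readme : String) (max_chars : Int) (out : String) : Prop := out = extract_readme_excerpt_py_alt readme max_chars
instance (readme : String) (max_chars : Int) (out : String) : Decidable (Spec_extract_readme_excerpt_py readme max_chars out) := by unfold Spec_extract_readme_excerpt_py; infer_instance

-- ===== CLAIM (what is proved, stated in full; the proofs are below) =====
def Claim_equal_extract_readme_excerpt_py : Prop := ∀ (readme : String) (max_chars : Int), Dom_extract_readme_excerpt_py readme max_chars → Spec_extract_readme_excerpt_py readme max_chars (extract_readme_excerpt_py readme max_chars)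

-- ===== LEMMAS AND PROOFS =====

-- A's loop body, recursively (acc split off)
def pvAuxA (c : Int) : List String → List String
  | [] => []
  | x :: xs =>
    if pvIsHeader x then x :: pvAuxA 10 xs
    else if c > 0 then x :: pvAuxA (c - 1) xs
    else pvAuxA c xs

-- A's capture_next after processing a prefix
def pvCval (pre : List String) : Int :=
  pre.foldl (fun c x => if pvIsHeader x then (10 : Int) else if c > 0 then c - 1 else c) 0

lemma pvFold_eq_aux (xs : List String) : ∀ (acc : List String) (c : Int),
    (xs.foldl (fun (st : List String × Int) line =>
      if pvKeywords.any (fun kw => PySem.Str.isIn kw (PySem.Str.lower line)) then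
        (st.1 ++ [line], 10)
      else if st.2 > 0 then
        (st.1 ++ [line], st.2 - 1)
      else st) (acc, c)).1 = acc ++ pvAuxA c xs := by
  induction xs with
  | nil => intro acc c; simp [pvAuxA]
  | cons x xs ih =>
    intro acc c
    rw [List.foldl_cons]
    split_ifs with h1 h2
    · rw [ih]
      simp [pvAuxA, show pvIsHeader x = true from h1]
    · rw [ih]
      have hx : pvIsHeader x = false := by simpa [pvIsHeader] using h1
      simp [pvAuxA, hx, h2]
    · rw [ih]
      have hx : pvIsHeader x = false := by simpa [pvIsHeader] using h1
      simp [pvAuxA, hx, h2]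

lemma pvCval_append (pre : List String) (x : String) :
    pvCval (pre ++ [x]) = if pvIsHeader x then (10 : Int) else if pvCval pre > 0 then pvCval pre - 1 else pvCval pre := by
  simp [pvCval, List.foldl_append]

-- cval characterized by the index of the last header
lemma pvCval_char (pre : List String) :
    pvCval pre = match pre.reverse.findIdx? pvIsHeader with
      | none => 0
      | some k => max (10 - (k : Int)) 0 := by
  induction pre using List.reverseRecOn with
  | nil => simp [pvCval]
  | append_singleton pre x ih =>
    rw [pvCval_append, ih]
    rw [List.reverse_append]
    simp only [List.reverse_singleton, List.singleton_append, List.findIdx?_cons]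
    by_cases hx : pvIsHeader x
    · simp [hx]
    · simp only [hx]
      cases h : pre.reverse.findIdx? pvIsHeader with
      | none => simp
      | some k =>
        simp only [Option.map_some]
        push_cast
        by_cases h10 : (10:Int) - k ≤ 0
        · rw [max_eq_right h10, max_eq_right (by omega)]
          simp
        · rw [max_eq_left (by omega)]
          rw [if_pos (by omega : (10:Int) - k > 0)]
          by_cases h11 : (10:Int) - (k + 1) ≤ 0
          · rw [max_eq_right h11]; omega
          · rw [max_eq_left (by omega)]; ring

lemma pvCval_nonneg (pre : List String) : 0 ≤ pvCval pre := by
  rw [pvCval_char]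
  cases h : pre.reverse.findIdx? pvIsHeader <;> simp

-- positivity of cval = a header in the last 10 lines
lemma pvTakeAny (r : List String) :
    (r.take 10).any pvIsHeader = decide (0 < (match r.findIdx? pvIsHeader with
      | none => (0 : Int)
      | some k => max (10 - (k : Int)) 0)) := by
  cases h : r.findIdx? pvIsHeader with
  | none =>
    have := List.findIdx?_eq_none_iff.mp h
    simp only [decide_eq_false (by omega : ¬ (0:Int) < 0)]
    rw [List.any_eq_false]
    intro a ha
    exact (by simpa using this a (List.mem_of_mem_take ha))
  | some k =>
    rcases List.findIdx?_eq_some_iff_findIdx_eq.mp h with ⟨hk, hfi⟩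
    by_cases hk10 : k < 10
    · have hpos : (0:Int) < max (10 - (k : Int)) 0 := by
        have : (k:Int) < 10 := by exact_mod_cast hk10
        exact lt_max_of_lt_left (by omega)
      simp only [decide_eq_true hpos]
      rw [List.any_eq_true]
      refine ⟨r[k], List.mem_take_iff_getElem.mpr ⟨k, by omega, rfl⟩, ?_⟩
      subst hfi; exact List.findIdx_getElem
    · have hnpos : ¬ (0:Int) < max (10 - (k : Int)) 0 := by
        have : (10:Int) ≤ (k : Int) := by exact_mod_cast Nat.le_of_not_lt hk10
        simp only [not_lt]
        exact max_le (by omega) le_rfl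
      simp only [decide_eq_false hnpos]
      rw [List.any_eq_false]
      intro a ha
      rcases List.mem_take_iff_getElem.mp ha with ⟨i, hi, rfl⟩
      have hlt : i < r.findIdx pvIsHeader := by omega
      simpa using List.not_of_lt_findIdx hlt

lemma pvLastTen (pre : List String) :
    (pre.drop (pre.length - 10)).any pvIsHeader = decide (0 < pvCval pre) := by
  have hdt : pre.drop (pre.length - 10) = (pre.reverse.take 10).reverse := by
    rw [List.reverse_take]; simp
  rw [hdt, List.any_reverse, pvTakeAny, pvCval_char]

-- the slice window at index pre.length of pre ++ x :: suf
lemma pvWindow (pre : List String) (x : String) (suf : List String) :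
    PySem.List.slice (pre ++ x :: suf) (some (max 0 ((pre.length : Int) - 10))) (some ((pre.length : Int) + 1))
      = pre.drop (pre.length - 10) ++ [x] := by
  have h0 : (0:Int) ≤ max 0 ((pre.length : Int) - 10) := le_max_left _ _
  have h1 : (0:Int) ≤ (pre.length : Int) + 1 := by positivity
  rw [PySem.List.slice_toNat _ h0 h1]
  have ha : (max 0 ((pre.length : Int) - 10)).toNat = pre.length - 10 := by
    simp [max_def]; split_ifs <;> omega
  have hb : ((pre.length : Int) + 1).toNat = pre.length + 1 := by omega
  rw [ha, hb]
  rw [List.drop_append_of_le_length (by omega)]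
  rw [List.take_append]
  have hlen : (pre.drop (pre.length - 10)).length = pre.length - (pre.length - 10) :=
    List.length_drop ..
  rw [List.take_of_length_le (by omega)]
  have h1' : pre.length + 1 - (pre.length - 10) - (pre.drop (pre.length - 10)).length = 1 := by omega
  rw [h1']
  simp

-- main correspondence: B's windowed filter over a suffix equals A's countdown loop
lemma pvMain (suf : List String) : ∀ (pre : List String),
    ((PySem.List.enumerate suf ((pre.length : Int))).filter (fun p =>
        (PySem.List.slice (pre ++ suf) (some (max 0 (p.1 - 10))) (some (p.1 + 1))).any pvIsHeader)).map (·.2)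
      = pvAuxA (pvCval pre) suf := by
  induction suf with
  | nil => intro pre; simp [pvAuxA, PySem.List.enumerate]
  | cons x suf ih =>
    intro pre
    rw [PySem.List.enumerate_cons, List.filter_cons]
    have hw : (PySem.List.slice (pre ++ x :: suf) (some (max 0 ((pre.length:Int) - 10))) (some ((pre.length:Int) + 1))).any pvIsHeader
        = ((pre.drop (pre.length - 10)).any pvIsHeader || pvIsHeader x) := by
      rw [pvWindow]; simp [List.any_append]
    have hrest : ((PySem.List.enumerate suf ((pre.length : Int) + 1)).filter (fun p =>
        (PySem.List.slice (pre ++ x :: suf) (some (max 0 (p.1 - 10))) (some (p.1 + 1))).any pvIsHeader)).map (·.2)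
        = pvAuxA (pvCval (pre ++ [x])) suf := by
      have := ih (pre ++ [x])
      simpa [List.append_assoc] using this
    by_cases hx : pvIsHeader x
    · have hcond : (PySem.List.slice (pre ++ x :: suf) (some (max 0 ((pre.length:Int) - 10))) (some ((pre.length:Int) + 1))).any pvIsHeader = true := by
        rw [hw, hx]; simp
      simp only [hcond, if_true, List.map_cons, hrest, pvCval_append, hx, if_true, pvAuxA]
    · by_cases hc : 0 < pvCval pre
      · have hcond : (PySem.List.slice (pre ++ x :: suf) (some (max 0 ((pre.length:Int) - 10))) (some ((pre.length:Int) + 1))).any pvIsHeader = true := by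
          rw [hw, pvLastTen]; simp [hc]
        have hc' : pvCval (pre ++ [x]) = pvCval pre - 1 := by
          rw [pvCval_append]; simp [hx, hc]
        simp only [hcond, if_true, List.map_cons, hrest, hc', pvAuxA]
        simp [hx, hc]
      · have hcz : pvCval pre = 0 := le_antisymm (by omega) (pvCval_nonneg pre)
        have hcond : (PySem.List.slice (pre ++ x :: suf) (some (max 0 ((pre.length:Int) - 10))) (some ((pre.length:Int) + 1))).any pvIsHeader = false := by
          rw [hw, pvLastTen]; simp [hcz, hx]
        have hc' : pvCval (pre ++ [x]) = pvCval pre := by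
          rw [pvCval_append]; simp [hx, hc]
        simp only [hcond, Bool.false_eq_true, if_false, hrest, hc', pvAuxA]
        simp [hx, hc]

-- the two ports build the same important_sections list
lemma pvSections (lines : List String) :
    ((PySem.List.enumerate lines).filter (fun p =>
        (PySem.List.slice lines (some (max 0 (p.1 - 10))) (some (p.1 + 1))).any pvIsHeader)).map (·.2)
      = (lines.foldl (fun (st : List String × Int) line =>
          if pvKeywords.any (fun kw => PySem.Str.isIn kw (PySem.Str.lower line)) then
            (st.1 ++ [line], 10)
          else if st.2 > 0 then
            (st.1 ++ [line], st.2 - 1)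
          else st) ([], 0)).1 := by
  rw [pvFold_eq_aux, List.nil_append]
  have := pvMain lines []
  simpa [pvCval] using this

-- ===== VERDICT (by name: the statement is the Claim_ definition above) =====
theorem extract_readme_excerpt_py_spec : Claim_equal_extract_readme_excerpt_py := by
  intro readme max_chars _
  unfold Spec_extract_readme_excerpt_py extract_readme_excerpt_py extract_readme_excerpt_py_alt
  by_cases h : readme = ""
  · simp [h]
  · simp only [h, if_false]
    rw [pvSections]
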